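-- pv_equiv track=rewrite | github.com/sbadame/timeline | src/nlp.py | merge_counts
-- ===== SOURCE A (Python) =====
-- def merge_counts(dict1, dict2):
--   # Combines to dictionaries, if a key exists in both, the value is their sum.
--   merged = {}
--   for key in merge_dicts(dict1, dict2):
--     if key in dict1 and key in dict2:
--       merged[key] = dict1[key] + dict2[key]
--     elif key in dict1:
--       merged[key] = dict1[key]
--     else:
--       merged[key] = dict2[key]
--   return merged
--
-- def merge_dicts(*args):
--   """The only way to do this in python2-3... """
--   m = {}
--   for arg in args:
--     m.update(arg)
--   return m
-- ===== SOURCE B (Python) =====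
-- def merge_counts(dict1, dict2):
--   # Copy dict1, then fold dict2 in with a single pass; same key order
--   # (dict1 keys first, then dict2-only keys) and same sums.
--   merged = dict(dict1)
--   for key, value in dict2.items():
--     if key in merged:
--       merged[key] = merged[key] + value
--     else:
--       merged[key] = value
--   return merged
-- ===== Notes on version B (the rewrite author's own statement) =====
-- stated objective: simpler
-- what changed: Drops the merge_dicts key-union helper and the per-key membership tests in both dicts; B copies dict1 and folds dict2 in with one pass over dict2.items().
import Mathlib
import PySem

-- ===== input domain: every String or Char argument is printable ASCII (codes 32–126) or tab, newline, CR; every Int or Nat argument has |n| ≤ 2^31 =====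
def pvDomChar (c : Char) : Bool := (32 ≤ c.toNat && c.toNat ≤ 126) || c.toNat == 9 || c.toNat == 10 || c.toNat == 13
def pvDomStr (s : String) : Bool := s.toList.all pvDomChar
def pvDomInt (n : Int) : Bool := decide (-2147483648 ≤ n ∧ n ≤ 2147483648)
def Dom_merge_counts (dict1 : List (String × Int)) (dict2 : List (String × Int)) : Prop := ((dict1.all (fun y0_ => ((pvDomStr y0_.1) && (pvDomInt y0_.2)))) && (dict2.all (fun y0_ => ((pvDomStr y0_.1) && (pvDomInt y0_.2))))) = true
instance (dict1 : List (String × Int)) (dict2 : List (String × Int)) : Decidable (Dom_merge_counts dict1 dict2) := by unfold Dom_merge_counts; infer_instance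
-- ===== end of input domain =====

-- B merges by copying dict1 and folding dict2 in with a single pass, instead of
-- A's union-of-keys helper with membership tests in both dicts; same return value.

-- ===== PORT A =====
-- merge_dicts(dict1, dict2): m = {}; m.update(dict1); m.update(dict2)
def merge_dicts (dict1 : List (String × Int)) (dict2 : List (String × Int)) : PySem.Dict String Int :=
  (PySem.Dict.empty.update dict1).update dict2

def merge_counts (dict1 : List (String × Int)) (dict2 : List (String × Int)) : List (String × Int) :=
  let d1 := PySem.Dict.ofList dict1
  let d2 := PySem.Dict.ofList dict2
  let merged := (merge_dicts dict1 dict2).keys.foldl (fun acc key =>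
    if d1.contains key && d2.contains key then
      acc.insert key (d1.getD key 0 + d2.getD key 0)
    else if d1.contains key then
      acc.insert key (d1.getD key 0)
    else
      acc.insert key (d2.getD key 0)) PySem.Dict.empty
  merged.items

-- ===== PORT B =====
def merge_counts_alt (dict1 : List (String × Int)) (dict2 : List (String × Int)) : List (String × Int) :=
  let merged := PySem.Dict.ofList dict1
  ((PySem.Dict.ofList dict2).items.foldl (fun m p =>
    if m.contains p.1 then m.insert p.1 (m.getD p.1 0 + p.2)
    else m.insert p.1 p.2) merged).items

-- ===== PRECONDITION & SPEC =====
def Spec_merge_counts (dict1 : List (String × Int)) (dict2 : List (String × Int)) (out : List (String × Int)) : Prop := out = merge_counts_alt dict1 dict2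
instance (dict1 : List (String × Int)) (dict2 : List (String × Int)) (out : List (String × Int)) : Decidable (Spec_merge_counts dict1 dict2 out) := by unfold Spec_merge_counts; infer_instance

-- ===== CLAIM (what is proved, stated in full; the proofs are below) =====
def Claim_equal_merge_counts : Prop := ∀ (dict1 : List (String × Int)) (dict2 : List (String × Int)), Dom_merge_counts dict1 dict2 → Spec_merge_counts dict1 dict2 (merge_counts dict1 dict2)

-- ===== LEMMAS AND PROOFS =====

-- Set.update absorbs deduplication of its argument
theorem set_update_ofList {α : Type} [BEq α] [LawfulBEq α] (s : PySem.Set α) (xs : List α) :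
    PySem.Set.update s (PySem.Set.ofList xs) = PySem.Set.update s xs := by
  rw [PySem.Set.update_eq_append_filter, PySem.Set.update_eq_append_filter,
    PySem.Set.ofList_ofList]

-- value of B's fold at any key, for a pair list with distinct keys
theorem getD_mergeStep (l : List (String × Int)) (d : PySem.Dict String Int) (k : String)
    (hnd : (l.map (·.1)).Nodup) :
    (l.foldl (fun m p => m.insert p.1 (if m.contains p.1 then m.getD p.1 0 + p.2 else p.2)) d).getD k 0
    = if (PySem.Dict.mk l).contains k then
        (if d.contains k then d.getD k 0 + (PySem.Dict.mk l).getD k 0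
         else (PySem.Dict.mk l).getD k 0)
      else d.getD k 0 := by
  induction l generalizing d with
  | nil => simp [PySem.Dict.contains_mk]
  | cons a rest ih =>
    rcases a with ⟨a1, a2⟩
    obtain ⟨ha, hrest⟩ := List.nodup_cons.mp hnd
    rw [List.foldl_cons, ih _ (by simpa using hrest)]
    by_cases hk : k = a1
    · subst hk
      have hnotin : (PySem.Dict.mk rest).contains k = false := by
        rw [PySem.Dict.contains_mk]
        simp only [List.any_eq_false]
        intro p hp hpe
        exact ha (by simpa [(beq_iff_eq).mp hpe] using List.mem_map_of_mem (f := fun x => x.1) hp)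
      have hg : (PySem.Dict.mk ((k, a2) :: rest)).getD k 0 = a2 := by
        rw [PySem.Dict.getD_eq_get?_getD, PySem.Dict.get?_mk_cons]; simp
      have hc : (PySem.Dict.mk ((k, a2) :: rest)).contains k = true := by
        simp [PySem.Dict.contains_mk]
      rw [hc, hg]
      simp [hnotin, PySem.Dict.getD_insert_self]
    · have h1 : ((PySem.Dict.mk ((a1, a2) :: rest)).contains k) = ((PySem.Dict.mk rest).contains k) := by
        simp [PySem.Dict.contains_mk, List.any_cons, (by simpa using Ne.symm hk : (a1 == k) = false)]
      have h2 : (PySem.Dict.mk ((a1, a2) :: rest)).getD k 0 = (PySem.Dict.mk rest).getD k 0 := by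
        rw [PySem.Dict.getD_eq_get?_getD, PySem.Dict.getD_eq_get?_getD,
          PySem.Dict.get?_mk_cons]
        simp [(by simpa using Ne.symm hk : (a1 == k) = false)]
      rw [h1, h2, PySem.Dict.contains_insert,
        PySem.Dict.getD_insert_of_ne _ _ _ hk]
      simp [(by simpa using hk : (k == a1) = false)]

theorem merge_counts_main : ∀ (dict1 dict2 : List (String × Int)),
    merge_counts dict1 dict2 = merge_counts_alt dict1 dict2 := by
  intro dict1 dict2
  unfold merge_counts merge_counts_alt merge_dicts
  simp only []
  set d1 := PySem.Dict.ofList dict1 with hd1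
  set d2 := PySem.Dict.ofList dict2 with hd2
  -- the value A stores at each key
  set val : String → Int := fun key =>
    if d1.contains key && d2.contains key then d1.getD key 0 + d2.getD key 0
    else if d1.contains key then d1.getD key 0
    else d2.getD key 0 with hval
  have hm : (PySem.Dict.empty.update dict1).update dict2 = d1.update dict2 := rfl
  rw [hm]
  -- A's fold writes val key at each key
  have hAfun : (fun (acc : PySem.Dict String Int) (key : String) =>
      if d1.contains key && d2.contains key then
        acc.insert key (d1.getD key 0 + d2.getD key 0)
      else if d1.contains key then acc.insert key (d1.getD key 0)
      else acc.insert key (d2.getD key 0))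
      = fun acc key => acc.insert key (val key) := by
    funext acc key
    by_cases h1 : d1.contains key <;> by_cases h2 : d2.contains key <;>
      simp [hval, h1, h2]
  rw [hAfun]
  -- B's fold is a single insert per step
  have hBfun : (fun (m : PySem.Dict String Int) (p : String × Int) =>
      if m.contains p.1 then m.insert p.1 (m.getD p.1 0 + p.2) else m.insert p.1 p.2)
      = fun m p => m.insert p.1 (if m.contains p.1 then m.getD p.1 0 + p.2 else p.2) := by
    funext m p
    by_cases h : m.contains p.1 <;> simp [h]
  rw [hBfun]
  set B := d2.items.foldl
    (fun m p => m.insert p.1 (if m.contains p.1 then m.getD p.1 0 + p.2 else p.2)) d1 with hB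
  -- keys
  have hkm : (d1.update dict2).keys = PySem.Set.update d1.keys (dict2.map (·.1)) :=
    PySem.Dict.keys_foldl_insert_key dict2 (·.1) (fun _ p => p.2) d1
  have hkd2 : d2.keys = PySem.Set.ofList (dict2.map (·.1)) := by
    have := PySem.Dict.keys_foldl_insert_key (ν := Int) dict2 (·.1) (fun _ p => p.2)
      PySem.Dict.empty
    rw [hd2]
    simpa [PySem.Dict.keys_empty, PySem.Set.update_nil_left] using this
  have hBkeys : B.keys = (d1.update dict2).keys := by
    rw [hB, PySem.Dict.keys_foldl_insert_key d2.items (·.1)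
      (fun m p => if m.contains p.1 then m.getD p.1 0 + p.2 else p.2) d1]
    have : d2.items.map (·.1) = d2.keys := rfl
    rw [this, hkd2, hkm, set_update_ofList]
  -- B's value at each key is val
  have hBval : ∀ k, B.getD k 0 = val k := by
    intro k
    have hnd2 : (d2.items.map (·.1)).Nodup := PySem.Dict.nodup_keys_ofList dict2
    have := getD_mergeStep d2.items d1 k hnd2
    have heta : PySem.Dict.mk d2.items = d2 := rfl
    rw [heta] at this
    rw [hB, this, hval]
    cases h1 : d1.contains k <;> cases h2 : d2.contains k <;> simp [h1, h2]
    rw [PySem.Dict.getD_of_not_contains _ _ h1, PySem.Dict.getD_of_not_contains _ _ h2]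
  -- items of A's merged dict
  have hmnd : (d1.update dict2).keys.Nodup :=
    PySem.Dict.nodup_keys_update d1 dict2 (PySem.Dict.nodup_keys_ofList dict1)
  have hA : ((d1.update dict2).keys.foldl
      (fun acc key => acc.insert key (val key)) PySem.Dict.empty).items
      = (d1.update dict2).keys.map (fun k => (k, val k)) := by
    have := PySem.Dict.items_foldl_insert_fresh (d1.update dict2).keys id val
      PySem.Dict.empty (by intro a _; simp) (by simpa using hmnd)
    simpa using this
  -- items of B
  have hBnd : B.keys.Nodup := by rw [hBkeys]; exact hmnd
  have hBitems : B.items = B.keys.map (fun k => (k, B.getD k 0)) :=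
    PySem.Dict.items_eq_map_keys B hBnd 0
  rw [hA, hBitems, hBkeys]
  exact List.map_congr_left (fun k _ => by rw [hBval k])

-- ===== VERDICT (by name: the statement is the Claim_ definition above) =====
theorem merge_counts_spec : Claim_equal_merge_counts := by
  intro d1 d2 _
  exact merge_counts_main d1 d2
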